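-- pv_equiv track=rewrite | github.com/conglu1997/erdos_321_computation | pruning.py | _forced_by_unique_high_power
-- ===== SOURCE A (Python) =====
-- from typing import Dict, Iterable, List, Sequence, Set, Tuple
--
-- def _primes_up_to(n: int) -> List[int]:
--     """Simple sieve-less prime list; n is small (<= few hundred) in practice."""
--     primes: List[int] = []
--     for cand in range(2, n + 1):
--         is_prime = True
--         for p in primes:
--             if p * p > cand:
--                 break
--             if cand % p == 0:
--                 is_prime = False
--                 break
--         if is_prime:
--             primes.append(cand)
--     return primes
--
-- def _valuation(n: int, p: int) -> int:
--     """Return v_p(n): largest k with p^k | n."""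
--     k = 0
--     while n % p == 0:
--         n //= p
--         k += 1
--     return k
--
-- def _forced_by_unique_high_power(N: int) -> Set[int]:
--     """Numbers that are the sole carrier of the highest p-adic exponent.
--
--     For any prime p, if among the still-eligible numbers there is a single
--     integer with maximal v_p, that integer cannot appear in a signed relation:
--     its contribution to the lcm-weighted sum would be ±1 mod p while all other
--     terms are 0 mod p. We iterate downward so once the unique top carrier is
--     removed, the next level can become unique as well (e.g., 32 then 16 for p=2
--     at N=36).
--     """
--     forced: Set[int] = set()
--     primes = _primes_up_to(N)
--     for p in primes:
--         candidates: Dict[int, int] = {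
--             i: _valuation(i, p)
--             for i in range(1, N + 1)
--             if i not in forced and i % p == 0
--         }
--         if not candidates:
--             continue
--         while candidates:
--             top_exp = max(candidates.values())
--             top_carriers = [i for i, v in candidates.items() if v == top_exp]
--             if len(top_carriers) == 1:
--                 only = top_carriers[0]
--                 forced.add(only)
--                 candidates.pop(only)
--             else:
--                 break
--     return forced
-- ===== SOURCE B (Python) =====
-- from typing import Dict, List, Set
--
--
-- def _primes_up_to(n: int) -> List[int]:
--     """Simple sieve-less prime list; n is small (<= few hundred) in practice."""
--     primes: List[int] = []
--     for cand in range(2, n + 1):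
--         is_prime = True
--         for p in primes:
--             if p * p > cand:
--                 break
--             if cand % p == 0:
--                 is_prime = False
--                 break
--         if is_prime:
--             primes.append(cand)
--     return primes
--
--
-- def _valuation(n: int, p: int) -> int:
--     """Return v_p(n): largest k with p^k | n."""
--     k = 0
--     while n % p == 0:
--         n //= p
--         k += 1
--     return k
--
--
-- def _forced_by_unique_high_power(N: int) -> Set[int]:
--     """Group the multiples of each prime p by their p-adic valuation once,
--     then walk the distinct valuations downward, forcing each level whose
--     carrier is unique and stopping at the first level that is not."""
--     forced: Set[int] = set()
--     for p in _primes_up_to(N):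
--         groups: Dict[int, List[int]] = {}
--         for i in range(p, N + 1, p):
--             if i not in forced:
--                 groups.setdefault(_valuation(i, p), []).append(i)
--         for e in sorted(groups, reverse=True):
--             g = groups[e]
--             if len(g) == 1:
--                 forced.add(g[0])
--             else:
--                 break
--     return forced
-- ===== Notes on version B (the rewrite author's own statement) =====
-- stated objective: faster
-- what changed: Per prime, B builds the valuation groups of the multiples of p in one pass over the stepped range of multiples and walks the distinct valuations once in descending sorted order, instead of A's re-scanning the whole candidate dict for its maximum and the top carriers on every removal (and A's filtering scan of the full range per prime).
import Mathlib
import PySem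

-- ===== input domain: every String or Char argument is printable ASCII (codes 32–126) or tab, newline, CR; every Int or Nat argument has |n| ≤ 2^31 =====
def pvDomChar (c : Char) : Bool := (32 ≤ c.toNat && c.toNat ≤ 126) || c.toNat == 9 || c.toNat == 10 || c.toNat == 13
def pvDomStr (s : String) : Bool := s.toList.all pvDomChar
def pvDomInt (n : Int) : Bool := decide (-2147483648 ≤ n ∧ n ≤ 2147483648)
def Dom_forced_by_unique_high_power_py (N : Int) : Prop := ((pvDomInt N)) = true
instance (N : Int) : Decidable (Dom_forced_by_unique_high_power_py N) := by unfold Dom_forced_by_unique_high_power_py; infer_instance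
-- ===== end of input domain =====

-- B replaces A's per-prime repeated max-scan over the candidate dict by grouping the multiples
-- of p by valuation once and walking the distinct valuations in descending order (objective: faster).

-- ===== PORT A =====
-- shared helper _primes_up_to: inner 'for p in primes: … break' loop
def pvPrimesInner : List Int → Int → Bool
  | [], _ => true
  | p :: rest, cand =>
    if p * p > cand then true
    else if PySem.Int.mod cand p == 0 then false
    else pvPrimesInner rest cand

def pvPrimesUpTo (n : Int) : List Int :=
  (PySem.List.pyRange 2 (n + 1) 1).foldl
    (fun primes cand => if pvPrimesInner primes cand then primes ++ [cand] else primes) []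

-- shared helper _valuation; the while loop is made total with fuel (n ≥ 1, p ≥ 2 at every call,
-- so n.natAbs + 1 iterations always suffice and the fuel never runs out on admitted inputs)
def pvValuationGo : Nat → Int → Int → Int → Int
  | 0, _, _, k => k
  | fuel + 1, n, p, k =>
    if PySem.Int.mod n p == 0 then pvValuationGo fuel (PySem.Int.floordiv n p) p (k + 1) else k

def pvValuation (n p : Int) : Int := pvValuationGo (n.natAbs + 1) n p 0

-- the 'while candidates:' loop of A; fuel = candidates.size (one key is popped per iteration)
def pvAWhile : Nat → PySem.Dict Int Int → PySem.Set Int → PySem.Set Int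
  | 0, _, forced => forced
  | fuel + 1, cand, forced =>
    if cand.size = 0 then forced
    else
      match PySem.List.max? cand.values (fun v => v) with
      | none => forced  -- unreachable: candidates nonempty
      | some top_exp =>
        let top_carriers := (cand.items.filter (fun iv => iv.2 == top_exp)).map (fun iv => iv.1)
        if top_carriers.length = 1 then
          let only := PySem.List.pyGetD top_carriers 0 0
          match cand.pop? only with
          | some (_, cand') => pvAWhile fuel cand' (PySem.Set.add forced only)
          | none => forced  -- unreachable: only is a key
        else forced

def forced_by_unique_high_power_py (N : Int) : List Int :=
  (pvPrimesUpTo N).foldl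
    (fun forced p =>
      let candidates : PySem.Dict Int Int :=
        (PySem.List.pyRange 1 (N + 1) 1).foldl
          (fun d i =>
            if !(PySem.Set.contains forced i) && (PySem.Int.mod i p == 0) then
              d.insert i (pvValuation i p)
            else d)
          PySem.Dict.empty
      if candidates.size = 0 then forced
      else pvAWhile candidates.size candidates forced)
    []

-- ===== PORT B =====
-- the 'for e in sorted(groups, reverse=True): … break' loop of B
def pvBScan : List Int → PySem.Dict Int (List Int) → PySem.Set Int → PySem.Set Int
  | [], _, forced => forced
  | e :: rest, groups, forced =>
    let g := groups.getD e []
    if g.length = 1 then pvBScan rest groups (PySem.Set.add forced (PySem.List.pyGetD g 0 0))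
    else forced

def forced_by_unique_high_power_py_alt (N : Int) : List Int :=
  (pvPrimesUpTo N).foldl
    (fun forced p =>
      let groups : PySem.Dict Int (List Int) :=
        (PySem.List.pyRange p (N + 1) p).foldl
          (fun d i =>
            if !(PySem.Set.contains forced i) then
              d.modify (pvValuation i p) [] (fun g => g ++ [i])
            else d)
          PySem.Dict.empty
      pvBScan (PySem.List.sorted groups.keys (fun e => e) true) groups forced)
    []

-- ===== PRECONDITION & SPEC =====
def Spec_forced_by_unique_high_power_py (N : Int) (out : List Int) : Prop := out = forced_by_unique_high_power_py_alt N
instance (N : Int) (out : List Int) : Decidable (Spec_forced_by_unique_high_power_py N out) := by unfold Spec_forced_by_unique_high_power_py; infer_instance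

-- ===== CLAIM (what is proved, stated in full; the proofs are below) =====
def Claim_equal_forced_by_unique_high_power_py : Prop := ∀ (N : Int), Dom_forced_by_unique_high_power_py N → Spec_forced_by_unique_high_power_py N (forced_by_unique_high_power_py N)

-- ===== LEMMAS AND PROOFS =====

-- spec-side scan: pvBScan with the group dict replaced by an abstract lookup function
def pvScanG (g : Int → List Int) : List Int → PySem.Set Int → PySem.Set Int
  | [], forced => forced
  | e :: rest, forced =>
    if (g e).length = 1 then
      pvScanG g rest (PySem.Set.add forced (PySem.List.pyGetD (g e) 0 0))
    else forced

theorem pvBScan_eq_scanG (groups : PySem.Dict Int (List Int)) (g : Int → List Int) :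
    ∀ (es : List Int) (forced : PySem.Set Int), (∀ e ∈ es, groups.getD e [] = g e) →
    pvBScan es groups forced = pvScanG g es forced := by
  intro es
  induction es with
  | nil => intro forced _; rfl
  | cons e rest ih =>
    intro forced h
    have he : groups.getD e [] = g e := h e (by simp)
    simp only [pvBScan, pvScanG, he]
    split
    · exact ih _ (fun x hx => h x (by simp [hx]))
    · rfl

theorem pvScanG_congr (g g' : Int → List Int) :
    ∀ (es : List Int) (forced : PySem.Set Int), (∀ e ∈ es, g e = g' e) →
    pvScanG g es forced = pvScanG g' es forced := by
  intro es
  induction es with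
  | nil => intro forced _; rfl
  | cons e rest ih =>
    intro forced h
    have he : g e = g' e := h e (by simp)
    simp only [pvScanG, he]
    split
    · exact ih _ (fun x hx => h x (by simp [hx]))
    · rfl

theorem pvPrimes_aux (l : List Int) (acc : List Int)
    (hacc : ∀ x ∈ acc, 2 ≤ x) (hl : ∀ x ∈ l, 2 ≤ x) :
    ∀ x ∈ l.foldl (fun primes cand => if pvPrimesInner primes cand then primes ++ [cand] else primes) acc, 2 ≤ x := by
  induction l generalizing acc with
  | nil => simpa using hacc
  | cons c t ih =>
    intro x hx
    refine ih _ ?_ (fun y hy => hl y (by simp [hy])) x hx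
    intro y hy
    simp only at hy
    split at hy
    · rcases List.mem_append.1 hy with h | h
      · exact hacc y h
      · simp at h; subst h; exact hl y (by simp)
    · exact hacc y hy

theorem pvPrimes_ge_two (N : Int) : ∀ p ∈ pvPrimesUpTo N, 2 ≤ p := by
  refine pvPrimes_aux _ _ (by simp) ?_
  intro x hx
  have := (PySem.List.mem_pyRange_one (a := 2) (b := N+1) (x := x)).1 hx
  omega

theorem pvRangeMult (N p : Int) (hp : 2 ≤ p) :
    (PySem.List.pyRange 1 (N + 1) 1).filter (fun i => PySem.Int.mod i p == 0)
      = PySem.List.pyRange p (N + 1) p := by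
  have hp0 : (0:Int) < p := by omega
  have hlt : List.Pairwise (· < ·) ((PySem.List.pyRange 1 (N + 1) 1).filter (fun i => PySem.Int.mod i p == 0)) :=
    (PySem.List.pairwise_lt_pyRange_one 1 (N+1)).sublist List.filter_sublist
  have hltR : List.Pairwise (· < ·) (PySem.List.pyRange p (N + 1) p) := by
    rw [PySem.List.pyRange_of_pos _ _ hp0]
    refine List.Pairwise.map _ ?_ (List.pairwise_lt_range)
    intro a b hab
    have : (a:Int) < b := by exact_mod_cast hab
    nlinarith
  have hmem : ∀ x : Int, (x ∈ (PySem.List.pyRange 1 (N + 1) 1).filter (fun i => PySem.Int.mod i p == 0)) ↔ x ∈ PySem.List.pyRange p (N + 1) p := by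
    intro x
    rw [List.mem_filter, PySem.List.mem_pyRange_one, PySem.List.mem_pyRange_iff_of_pos hp0]
    constructor
    · rintro ⟨⟨h1, h2⟩, hd⟩
      have hdvd : p ∣ x := (PySem.Int.mod_eq_zero_iff_dvd x p).1 (by simpa using hd)
      exact ⟨Int.le_of_dvd (by omega) hdvd, h2, dvd_sub hdvd (dvd_refl p)⟩
    · rintro ⟨h1, h2, hd⟩
      have hdvd : p ∣ x := by
        have : p ∣ (x - p) + p := dvd_add hd (dvd_refl p)
        simpa using this
      exact ⟨⟨by omega, h2⟩, by simpa using (PySem.Int.mod_eq_zero_iff_dvd x p).2 hdvd⟩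
  have hperm : (PySem.List.pyRange p (N + 1) p).Perm ((PySem.List.pyRange 1 (N + 1) 1).filter (fun i => PySem.Int.mod i p == 0)) :=
    (List.perm_ext_iff_of_nodup (hltR.imp ne_of_lt) (hlt.imp ne_of_lt)).2 (fun a => ((hmem a).symm))
  exact (PySem.List.sorted_eq_of_perm_of_pairwise_lt _ _ (fun x => x) (List.Perm.refl _) hlt).symm.trans
    (PySem.List.sorted_eq_of_perm_of_pairwise_lt _ _ (fun x => x) hperm hltR)

theorem pvRangeMult_nodup (N p : Int) (hp : 2 ≤ p) :
    (PySem.List.pyRange p (N + 1) p).Nodup := by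
  rw [← pvRangeMult N p hp]
  exact (PySem.List.nodup_pyRange_one 1 (N+1)).filter _

-- the heart: A's repeated-max while loop equals B's descending scan over the fixed groups
theorem pvCore (v : Int → Int) : ∀ (fuel : Nat) (M : List Int) (forced : PySem.Set Int),
    M.Nodup → M.length ≤ fuel →
    pvAWhile fuel ⟨M.map (fun i => (i, v i))⟩ forced
      = pvScanG (fun e => M.filter (fun i => v i == e))
          (PySem.List.sorted (PySem.Set.ofList (M.map v)) (fun e => e) true) forced := by
  intro fuel
  induction fuel with
  | zero =>
    intro M forced hnd hle
    have hM : M = [] := List.eq_nil_of_length_eq_zero (by omega)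
    subst hM; rfl
  | succ fuel ih =>
    intro M forced hnd hle
    by_cases hM : M = []
    · subst hM; rfl
    -- the dict's values are M.map v
    have hvals : (PySem.Dict.mk (M.map (fun i => (i, v i)))).values = M.map v := by
      simp [PySem.Dict.values, List.map_map, Function.comp_def]
    have hkeys : (PySem.Dict.mk (M.map (fun i => (i, v i)))).keys = M := by
      simp [PySem.Dict.keys, List.map_map, Function.comp_def]
    cases hmax : PySem.List.max? (M.map v) (fun v => v) with
    | none =>
      exact absurd (by simpa using (PySem.List.max?_eq_none_iff _ _).1 hmax) hM
    | some top =>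
      have htopmem : top ∈ M.map v := PySem.List.max?_mem hmax
      have htople : ∀ y ∈ M.map v, y ≤ top := PySem.List.max?_isMax hmax
      -- carriers
      have hcar : ((M.map (fun i => (i, v i))).filter (fun iv => iv.2 == top)).map (fun iv => iv.1)
          = M.filter (fun i => v i == top) := by
        simp [List.filter_map, List.map_map, Function.comp_def]
      -- facts about ds
      have hperm : (PySem.List.sorted (PySem.Set.ofList (M.map v)) (fun e => e) true).Perm (PySem.Set.ofList (M.map v)) :=
        PySem.List.sorted_perm _ _ true
      have hnds : (PySem.List.sorted (PySem.Set.ofList (M.map v)) (fun e => e) true).Nodup :=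
        hperm.nodup_iff.2 (PySem.Set.nodup_ofList _)
      have hge := PySem.List.sorted_pairwise_rev (PySem.Set.ofList (M.map v)) (fun e => e)
      have hgt : List.Pairwise (fun a b => b < a) (PySem.List.sorted (PySem.Set.ofList (M.map v)) (fun e => e) true) :=
        (hge.and hnds).imp (fun h => lt_of_le_of_ne h.1 (Ne.symm h.2))
      have hmem : ∀ x, x ∈ PySem.List.sorted (PySem.Set.ofList (M.map v)) (fun e => e) true ↔ x ∈ M.map v :=
        fun x => hperm.mem_iff.trans (PySem.Set.mem_ofList _ _)
      cases hds : PySem.List.sorted (PySem.Set.ofList (M.map v)) (fun e => e) true with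
      | nil =>
        exact absurd ((hmem top).2 htopmem) (by rw [hds]; simp)
      | cons d0 dt =>
        rw [hds] at hnds hgt hmem
        have hd0 : d0 = top := by
          have h1 : d0 ≤ top := htople d0 ((hmem d0).1 (by simp))
          rcases List.mem_cons.1 ((hmem top).2 htopmem) with h | h
          · omega
          · exact absurd ((List.pairwise_cons.1 hgt).1 top h) (by omega)
        subst hd0
        -- unfold one step of pvAWhile
        have hsz : ¬ ((PySem.Dict.mk (M.map (fun i => (i, v i)))).size = 0) := by
          simp [PySem.Dict.size, hM]
        rw [pvAWhile, if_neg hsz, hvals, hmax]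
        simp only [hcar, pvScanG]
        by_cases hlen : (M.filter (fun i => v i == d0)).length = 1
        · rw [if_pos hlen, if_pos hlen]
          obtain ⟨only, honly⟩ := List.length_eq_one_iff.1 hlen
          have honlyM : only ∈ M ∧ v only = d0 := by
            have : only ∈ M.filter (fun i => v i == d0) := by rw [honly]; simp
            simpa using this
          have hget : PySem.List.pyGetD (M.filter (fun i => v i == d0)) 0 0 = only := by
            rw [honly]; rfl
          rw [hget]
          -- pop? reduces
          have hkn : (PySem.Dict.mk (M.map (fun i => (i, v i)))).keys.Nodup := by rw [hkeys]; exact hnd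
          have hgets : (PySem.Dict.mk (M.map (fun i => (i, v i)))).get? only = some (v only) :=
            PySem.Dict.get?_of_mem_items _ (List.mem_map.2 ⟨only, honlyM.1, rfl⟩) hkn
          rw [PySem.Dict.pop?, hgets]
          simp only [Option.map_some]
          -- erase = filtered map
          have herase : (PySem.Dict.mk (M.map (fun i => (i, v i)))).erase only
              = ⟨(M.filter (fun i => !(v i == d0))).map (fun i => (i, v i))⟩ := by
            simp only [PySem.Dict.erase, List.filter_map]
            congr 1
            congr 1
            apply List.filter_congr
            intro i hi
            simp only [Function.comp]
            by_cases hio : i = only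
            · subst hio; simp [honlyM.2]
            · have hvi : ¬ (v i = d0) := by
                intro hv
                have : i ∈ M.filter (fun i => v i == d0) := by simp [hi, hv]
                rw [honly] at this; simp at this; exact hio this
              simp [hio, hvi]
          rw [herase]
          -- IH
          have hndM' : (M.filter (fun i => !(v i == d0))).Nodup := hnd.filter _
          have hlenM' : (M.filter (fun i => !(v i == d0))).length ≤ fuel := by
            have : (M.filter (fun i => !(v i == d0))).length < M.length := by
              rw [List.length_filter_lt_length_iff_exists]
              exact ⟨only, honlyM.1, by simp [honlyM.2]⟩
            omega
          rw [ih _ _ hndM' hlenM']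
          -- dt = sorted of the reduced list
          have hmemM' : ∀ x, x ∈ (M.filter (fun i => !(v i == d0))).map v ↔ (x ∈ M.map v ∧ x ≠ d0) := by
            intro x
            constructor
            · rintro hx
              rcases List.mem_map.1 hx with ⟨i, hi, rfl⟩
              rcases List.mem_filter.1 hi with ⟨hiM, hvi⟩
              simp at hvi
              exact ⟨List.mem_map.2 ⟨i, hiM, rfl⟩, hvi⟩
            · rintro ⟨hx, hne⟩
              rcases List.mem_map.1 hx with ⟨i, hi, rfl⟩
              exact List.mem_map.2 ⟨i, List.mem_filter.2 ⟨hi, by simpa using hne⟩, rfl⟩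
          have hdt : PySem.List.sorted (PySem.Set.ofList ((M.filter (fun i => !(v i == d0))).map v)) (fun e => e) true = dt := by
            apply PySem.List.sorted_rev_eq_of_perm_of_pairwise_gt
            · rw [List.perm_ext_iff_of_nodup (List.nodup_cons.1 hnds).2 (PySem.Set.nodup_ofList _)]
              intro x
              rw [PySem.Set.mem_ofList, hmemM']
              constructor
              · intro hx
                refine ⟨(hmem x).1 (by simp [hx]), ?_⟩
                rintro rfl
                exact (List.nodup_cons.1 hnds).1 hx
              · rintro ⟨hx, hne⟩
                rcases List.mem_cons.1 ((hmem x).2 hx) with h | h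
                · omega
                · exact h
            · exact (List.pairwise_cons.1 hgt).2
          rw [hdt]
          -- replace the group lookups on the reduced list by lookups on M
          apply pvScanG_congr
          intro e he
          have hetop : e ≠ d0 := by
            rintro rfl
            exact (List.nodup_cons.1 hnds).1 he
          rw [List.filter_filter]
          apply List.filter_congr
          intro i hi
          by_cases hv : v i = e
          · simp [hv, hetop]
          · simp [hv]
        · rw [if_neg hlen, if_neg hlen]

-- per-prime step equality
theorem pvStep (N p : Int) (hp : 2 ≤ p) (forced : PySem.Set Int) :
    (let candidates : PySem.Dict Int Int :=
        (PySem.List.pyRange 1 (N + 1) 1).foldl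
          (fun d i =>
            if !(PySem.Set.contains forced i) && (PySem.Int.mod i p == 0) then
              d.insert i (pvValuation i p)
            else d)
          PySem.Dict.empty
      if candidates.size = 0 then forced
      else pvAWhile candidates.size candidates forced)
    = (let groups : PySem.Dict Int (List Int) :=
        (PySem.List.pyRange p (N + 1) p).foldl
          (fun d i =>
            if !(PySem.Set.contains forced i) then
              d.modify (pvValuation i p) [] (fun g => g ++ [i])
            else d)
          PySem.Dict.empty
      pvBScan (PySem.List.sorted groups.keys (fun e => e) true) groups forced) := by
  set M := (PySem.List.pyRange p (N + 1) p).filter (fun i => !(PySem.Set.contains forced i)) with hMdef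
  have hndM : M.Nodup := (pvRangeMult_nodup N p hp).filter _
  -- A's candidate dict is the literal dict over M
  have hA : (PySem.List.pyRange 1 (N + 1) 1).foldl
      (fun d i =>
        if !(PySem.Set.contains forced i) && (PySem.Int.mod i p == 0) then
          d.insert i (pvValuation i p)
        else d) PySem.Dict.empty
      = ⟨M.map (fun i => (i, pvValuation i p))⟩ := by
    rw [PySem.List.foldl_if_eq_foldl_filter]
    have hfil : (PySem.List.pyRange 1 (N + 1) 1).filter
        (fun i => !(PySem.Set.contains forced i) && (PySem.Int.mod i p == 0)) = M := by
      rw [hMdef, ← pvRangeMult N p hp, List.filter_filter]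
    rw [hfil]
    apply PySem.Dict.ext
    rw [PySem.Dict.items_foldl_insert_fresh M (fun i => i) (fun i => pvValuation i p)
      PySem.Dict.empty (fun a _ => PySem.Dict.contains_empty a) (by simpa using hndM)]
    simp [PySem.Dict.empty]
  -- B's group dict facts
  have hB : (PySem.List.pyRange p (N + 1) p).foldl
      (fun d i =>
        if !(PySem.Set.contains forced i) then
          d.modify (pvValuation i p) [] (fun g => g ++ [i])
        else d) PySem.Dict.empty
      = M.foldl (fun d i => d.modify (pvValuation i p) [] (fun g => g ++ [i])) PySem.Dict.empty := by
    rw [PySem.List.foldl_if_eq_foldl_filter]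
  have hkeys : (M.foldl (fun d i => d.modify (pvValuation i p) [] (fun g => g ++ [i]))
      PySem.Dict.empty).keys = PySem.Set.ofList (M.map (fun i => pvValuation i p)) := by
    rw [PySem.Dict.keys_foldl_modify_key M (fun i => pvValuation i p) [] (fun _ i => fun g => g ++ [i])]
    rfl
  have hgetD : ∀ e : Int, (M.foldl (fun d i => d.modify (pvValuation i p) [] (fun g => g ++ [i]))
      PySem.Dict.empty).getD e [] = M.filter (fun i => pvValuation i p == e) := by
    intro e
    have hmapfold : M.foldl (fun d i => d.modify (pvValuation i p) [] (fun g => g ++ [i])) PySem.Dict.empty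
        = (M.map (fun i => (pvValuation i p, i))).foldl
            (fun d q => d.modify q.1 [] (fun g => g ++ [q.2])) PySem.Dict.empty := by
      rw [List.foldl_map]
    rw [hmapfold, PySem.Dict.getD_foldl_modify_append]
    simp [List.filter_map, List.map_map, Function.comp_def]
  -- assemble
  simp only [hA, hB, hkeys]
  have hsize : (PySem.Dict.mk (M.map (fun i => (i, pvValuation i p)))).size = M.length := by
    simp [PySem.Dict.size]
  have hAstep : (if (PySem.Dict.mk (M.map (fun i => (i, pvValuation i p)))).size = 0 then forced
      else pvAWhile (PySem.Dict.mk (M.map (fun i => (i, pvValuation i p)))).size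
        (PySem.Dict.mk (M.map (fun i => (i, pvValuation i p)))) forced)
      = pvAWhile M.length ⟨M.map (fun i => (i, pvValuation i p))⟩ forced := by
    rw [hsize]
    by_cases h0 : M.length = 0
    · rw [if_pos h0, h0]; rfl
    · rw [if_neg h0]
  rw [hAstep, pvCore (fun i => pvValuation i p) M.length M forced hndM (le_refl _),
    pvBScan_eq_scanG _ _ _ _ (fun e _ => hgetD e)]

-- ===== VERDICT (by name: the statement is the Claim_ definition above) =====
theorem forced_by_unique_high_power_py_spec : Claim_equal_forced_by_unique_high_power_py := by
  intro N _
  unfold Spec_forced_by_unique_high_power_py forced_by_unique_high_power_py forced_by_unique_high_power_py_alt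
  exact PySem.List.foldl_congr_mem _ _ _ _
    (fun forced p hp => pvStep N p (pvPrimes_ge_two N p hp) forced)
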